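-- pv_equiv track=rewrite | github.com/TanguyDouillard/Programmes-python | Python/6.12 Activité4.py | Note
-- ===== SOURCE A (Python) =====
-- def Note(dico):
--     max=0
--     a=[]
--     for maximum in dico.values():
--         if maximum>max:
--             max=maximum
--     for personne,maximum in dico.items():
--         if maximum == max:
--             a.append(personne)
--     return a, max
-- ===== SOURCE B (Python) =====
-- def Note(dico):
--     max = 0
--     a = []
--     for personne, maximum in dico.items():
--         if maximum > max:
--             max = maximum
--             a = [personne]
--         elif maximum == max:
--             a.append(personne)
--     return a, max
-- ===== Notes on version B (the rewrite author's own statement) =====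
-- stated objective: simpler
-- what changed: Replaces A's two sequential scans (one to find the maximum, one to collect the keys achieving it) with a single pass that maintains both the running maximum and the list of keys achieving it, resetting the list when a strictly larger value appears.
import Mathlib
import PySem

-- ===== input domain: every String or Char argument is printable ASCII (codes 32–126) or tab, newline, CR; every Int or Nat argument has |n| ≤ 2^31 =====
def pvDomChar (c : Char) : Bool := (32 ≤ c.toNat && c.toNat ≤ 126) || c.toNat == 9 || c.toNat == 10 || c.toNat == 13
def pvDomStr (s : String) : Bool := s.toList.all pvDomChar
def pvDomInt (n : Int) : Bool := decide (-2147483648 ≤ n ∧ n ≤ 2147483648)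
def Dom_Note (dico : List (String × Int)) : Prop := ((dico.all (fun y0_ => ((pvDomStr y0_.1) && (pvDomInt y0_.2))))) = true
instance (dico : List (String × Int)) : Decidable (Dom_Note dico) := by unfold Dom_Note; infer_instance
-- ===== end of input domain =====

-- B replaces A's two scans (find max, then collect keys) with one pass keeping the running
-- maximum together with the list of keys achieving it (objective: simpler).

-- ===== PORT A =====
-- first loop: max = 0; for maximum in dico.values(): if maximum > max: max = maximum
-- second loop: a = []; for personne, maximum in dico.items(): if maximum == max: a.append(personne)
def Note (dico : List (String × Int)) : List String × Int :=
  let mx := dico.foldl (fun m p => if p.2 > m then p.2 else m) 0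
  let a := dico.foldl (fun a p => if p.2 = mx then a ++ [p.1] else a) ([] : List String)
  (a, mx)

-- ===== PORT B =====
-- single pass over dico.items(), state = (keys achieving running max, running max)
def Note_alt (dico : List (String × Int)) : List String × Int :=
  dico.foldl
    (fun st p =>
      if p.2 > st.2 then ([p.1], p.2)
      else if p.2 = st.2 then (st.1 ++ [p.1], st.2)
      else st)
    (([] : List String), (0 : Int))

-- ===== PRECONDITION & SPEC =====
def Spec_Note (dico : List (String × Int)) (out : List String × Int) : Prop := out = Note_alt dico
instance (dico : List (String × Int)) (out : List String × Int) : Decidable (Spec_Note dico out) := by unfold Spec_Note; infer_instance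

-- ===== CLAIM (what is proved, stated in full; the proofs are below) =====
def Claim_equal_Note : Prop := ∀ (dico : List (String × Int)), Dom_Note dico → Spec_Note dico (Note dico)

-- ===== LEMMAS AND PROOFS =====

-- proof-only helper: the running maximum of A's first loop (definitionally its foldl)
def runMax (l : List (String × Int)) (m0 : Int) : Int :=
  l.foldl (fun m p => if p.2 > m then p.2 else m) m0

-- the running maximum never decreases
theorem runMax_ge (l : List (String × Int)) (m0 : Int) : m0 ≤ runMax l m0 := by
  induction l generalizing m0 with
  | nil => simp [runMax]
  | cons p t ih =>
    simp only [runMax, List.foldl_cons]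
    split
    · exact le_trans (le_of_lt (by assumption)) (ih _)
    · exact ih _

-- A's collecting loop is filter-then-project, for any accumulator
theorem collect_eq_filter (l : List (String × Int)) (M : Int) (a0 : List String) :
    l.foldl (fun a p => if p.2 = M then a ++ [p.1] else a) a0
      = a0 ++ (l.filter (fun p => p.2 = M)).map Prod.fst := by
  induction l generalizing a0 with
  | nil => simp
  | cons p t ih =>
    simp only [List.foldl_cons, List.filter_cons]
    by_cases h : p.2 = M
    · simp [h, ih, List.append_assoc]
    · simp [h, ih]

-- invariant of B's single pass: it computes the running maximum M of the tail together with
-- the keys achieving M (the accumulated keys survive exactly when the start value m0 equals M)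
theorem alt_fold_eq (l : List (String × Int)) (a0 : List String) (m0 : Int) :
    l.foldl
      (fun st p =>
        if p.2 > st.2 then ([p.1], p.2)
        else if p.2 = st.2 then (st.1 ++ [p.1], st.2)
        else st)
      (a0, m0)
      = ((if m0 = runMax l m0 then a0 else [])
          ++ (l.filter (fun p => p.2 = runMax l m0)).map Prod.fst, runMax l m0) := by
  induction l generalizing a0 m0 with
  | nil => simp [runMax]
  | cons p t ih =>
    simp only [List.foldl_cons, List.filter_cons]
    by_cases hgt : p.2 > m0
    · -- reset: m0 < p.2 ≤ M, so m0 ≠ M and a0 is dropped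
      have h1 : runMax (p :: t) m0 = runMax t p.2 := by
        simp only [runMax, List.foldl_cons, if_pos hgt]
      rw [if_pos hgt, ih, h1]
      have hge := runMax_ge t p.2
      obtain ⟨M, hMdef⟩ : ∃ M, runMax t p.2 = M := ⟨_, rfl⟩
      rw [hMdef] at hge ⊢
      have hne : ¬ (m0 = M) := by omega
      simp only [if_neg hne]
      by_cases hpM : p.2 = M
      · simp [hpM]
      · simp [hpM]
    · have h1 : runMax (p :: t) m0 = runMax t m0 := by
        simp only [runMax, List.foldl_cons, if_neg hgt]
      rw [if_neg hgt, h1]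
      by_cases heq : p.2 = m0
      · -- append: running max unchanged
        rw [if_pos heq, ih]
        obtain ⟨M, hMdef⟩ : ∃ M, runMax t m0 = M := ⟨_, rfl⟩
        rw [hMdef]
        by_cases hM : m0 = M
        · simp [heq, hM, List.append_assoc]
        · simp [heq, hM]
      · -- skip: p.2 < m0 ≤ M, so p is not collected
        rw [if_neg heq, ih]
        have hge := runMax_ge t m0
        obtain ⟨M, hMdef⟩ : ∃ M, runMax t m0 = M := ⟨_, rfl⟩
        rw [hMdef] at hge ⊢
        have hlt : p.2 < m0 := lt_of_le_of_ne (not_lt.mp hgt) heq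
        have hpM : ¬ p.2 = M := by omega
        simp [hpM]

-- ===== VERDICT (by name: the statement is the Claim_ definition above) =====
theorem Note_spec : Claim_equal_Note := by
  intro dico _
  simp only [Spec_Note, Note, Note_alt]
  rw [alt_fold_eq, collect_eq_filter]
  simp [runMax]
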